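-- pv_equiv track=rewrite | github.com/r-zachary-murray/complexipy | factorial_binarysplit.py | partial_product
-- ===== SOURCE A (Python) =====
-- def partial_product(start, stop):
--     length = stop - start
--     if length == 1:
--         return start << 1 | 1
--     if length == 2:
--         x = (start << 1 | 1)
--         return x * (x + 2)
--     middle = start + (length >> 1)
--     return partial_product(start, middle) * partial_product(middle, stop)
-- ===== SOURCE B (Python) =====
-- def partial_product(start, stop):
--     result = 1
--     for i in range(start, stop):
--         result *= (i << 1) | 1
--     return result
-- ===== Notes on version B (the rewrite author's own statement) =====
-- stated objective: simpler
-- what changed: Replaces the balanced binary-splitting recursion with a single left-to-right loop multiplying the odd numbers 2*i+1 into a running product.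
-- crash fix: For stop <= start A recurses forever and raises RecursionError; B returns the empty product 1. — e.g. on partial_product(3, 3): A raises RecursionError, B returns 1
import Mathlib
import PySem

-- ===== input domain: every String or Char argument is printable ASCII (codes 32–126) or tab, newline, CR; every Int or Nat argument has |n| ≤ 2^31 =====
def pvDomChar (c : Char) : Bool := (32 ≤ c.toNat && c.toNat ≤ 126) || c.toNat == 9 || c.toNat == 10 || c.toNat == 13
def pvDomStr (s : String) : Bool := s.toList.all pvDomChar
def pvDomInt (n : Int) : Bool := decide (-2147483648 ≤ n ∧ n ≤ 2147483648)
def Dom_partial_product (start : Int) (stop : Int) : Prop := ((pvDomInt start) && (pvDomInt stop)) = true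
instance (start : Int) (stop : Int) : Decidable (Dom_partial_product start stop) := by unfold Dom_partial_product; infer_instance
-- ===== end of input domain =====

-- B replaces A's binary-splitting recursion with one flat loop multiplying the odds 2*i+1 (simpler, same cost).


-- ===== PORT A =====
-- Literal port of A's recursion; the 'length ≤ 0' guard only makes the recursion total
-- (Python raises RecursionError there; such inputs are outside Pre_).
def partial_product (start : Int) (stop : Int) : Int :=
  let length := stop - start
  if length = 1 then start * 2 + 1           -- start << 1 | 1 (exact: 2*start is even, so |1 adds 1)
  else if length = 2 then
    let x := start * 2 + 1
    x * (x + 2)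
  else if length ≤ 0 then 1              -- unreachable under Pre_ (Python recurses forever)
  else
    let middle := start + PySem.Int.floordiv length 2   -- length >> 1
    partial_product start middle * partial_product middle stop
termination_by (stop - start).toNat
decreasing_by
  · have hf : Int.fdiv (stop - start) 2 = (stop - start) / 2 := by
      rw [Int.fdiv_eq_ediv]; norm_num
    simp only [PySem.Int.floordiv, hf] at *; omega
  · have hf : Int.fdiv (stop - start) 2 = (stop - start) / 2 := by
      rw [Int.fdiv_eq_ediv]; norm_num
    simp only [PySem.Int.floordiv, hf] at *; omega

-- ===== PORT B =====
def partial_product_alt (start : Int) (stop : Int) : Int :=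
  (PySem.List.pyRange start stop 1).foldl (fun result i => result * (i * 2 + 1)) 1

-- ===== PRECONDITION & SPEC =====
-- Pre_ excludes stop ≤ start, where Python A recurses forever (RecursionError).
def Pre_partial_product (start : Int) (stop : Int) : Prop := start < stop
instance (start : Int) (stop : Int) : Decidable (Pre_partial_product start stop) := by unfold Pre_partial_product; infer_instance
def pvWitness_partial_product : Int × Int := (0, 5)
-- On stop ≤ start A raises RecursionError; B returns the empty product 1.
def Raises_partial_product (start : Int) (stop : Int) : Prop := stop ≤ start
instance (start : Int) (stop : Int) : Decidable (Raises_partial_product start stop) := by unfold Raises_partial_product; infer_instance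
def pvRaiseWitness_partial_product : Int × Int := (3, 3)
def pvRaiseWitnessOut_partial_product : Int := 1
def Spec_partial_product (start : Int) (stop : Int) (out : Int) : Prop := out = partial_product_alt start stop
instance (start : Int) (stop : Int) (out : Int) : Decidable (Spec_partial_product start stop out) := by unfold Spec_partial_product; infer_instance

-- ===== CLAIM (what is proved, stated in full; the proofs are below) =====
def Claim_equal_partial_product : Prop := ∀ (start : Int) (stop : Int), Dom_partial_product start stop → Pre_partial_product start stop → Spec_partial_product start stop (partial_product start stop)
def Claim_raises_partial_product : Prop := (∀ (start : Int) (stop : Int), Dom_partial_product start stop → Raises_partial_product start stop → ¬ Pre_partial_product start stop) ∧ (Dom_partial_product (pvRaiseWitness_partial_product.1) (pvRaiseWitness_partial_product.2) ∧ Raises_partial_product (pvRaiseWitness_partial_product.1) (pvRaiseWitness_partial_product.2) ∧ partial_product_alt (pvRaiseWitness_partial_product.1) (pvRaiseWitness_partial_product.2) = pvRaiseWitnessOut_partial_product)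

-- ===== LEMMAS AND PROOFS =====

-- Factor the accumulator out of B's fold.
theorem alt_foldl_acc (l : List Int) (a : Int) :
    l.foldl (fun result i => result * (i * 2 + 1)) a
      = a * l.foldl (fun result i => result * (i * 2 + 1)) 1 := by
  induction l generalizing a with
  | nil => simp
  | cons x xs ih => simp only [List.foldl_cons]; rw [ih, ih (1 * (x * 2 + 1))]; ring

-- B's product splits at any midpoint of the range.
theorem alt_split (a m b : Int) (h1 : a ≤ m) (h2 : m ≤ b) :
    partial_product_alt a b = partial_product_alt a m * partial_product_alt m b := by
  unfold partial_product_alt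
  rw [PySem.List.pyRange_one_append a m b h1 h2, List.foldl_append, alt_foldl_acc]

theorem alt_singleton (a : Int) : partial_product_alt a (a + 1) = a * 2 + 1 := by
  unfold partial_product_alt
  rw [PySem.List.pyRange_one_singleton]
  simp [List.foldl]

theorem main (n : Nat) : ∀ (start stop : Int), stop - start = n → start < stop →
    partial_product start stop = partial_product_alt start stop := by
  induction n using Nat.strong_induction_on with
  | _ n ih =>
    intro start stop hn hlt
    rw [partial_product]
    simp only []
    by_cases h1 : stop - start = 1
    · rw [if_pos h1]
      have : stop = start + 1 := by omega
      rw [this, alt_singleton]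
    · rw [if_neg h1]
      by_cases h2 : stop - start = 2
      · rw [if_pos h2]
        have hs : stop = start + 2 := by omega
        rw [hs, alt_split start (start + 1) (start + 2) (by omega) (by omega),
            alt_singleton]
        have : start + 2 = (start + 1) + 1 := by omega
        rw [this, alt_singleton]
        ring
      · rw [if_neg h2, if_neg (by omega : ¬ stop - start ≤ 0)]
        have hfd : PySem.Int.floordiv (stop - start) 2 = (stop - start) / 2 := by
          simp only [PySem.Int.floordiv]
          rw [Int.fdiv_eq_ediv]; norm_num
        set m := start + PySem.Int.floordiv (stop - start) 2 with hm
        have hm1 : start < m := by rw [hm, hfd]; omega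
        have hm2 : m < stop := by rw [hm, hfd]; omega
        rw [ih (m - start).toNat (by omega) start m (by omega) hm1,
            ih (stop - m).toNat (by omega) m stop (by omega) hm2,
            ← alt_split start m stop (by omega) (by omega)]

-- ===== VERDICT (by name: the statement is the Claim_ definition above) =====
theorem partial_product_spec : Claim_equal_partial_product := by
  intro start stop _ hpre
  unfold Spec_partial_product
  exact main (stop - start).toNat start stop (by unfold Pre_partial_product at hpre; omega) hpre

@[simp] theorem partial_product_raises : Claim_raises_partial_product := by
  unfold Claim_raises_partial_product
  exact ⟨by intro a b _ h hp; exact absurd hp (by unfold Pre_partial_product Raises_partial_product at *; omega), by decide⟩
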